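-- pv_equiv track=rewrite | github.com/adotzh/sutro-problems | matmul/exp_rank2_v8.py | compute_analytical_cost
-- ===== SOURCE A (Python) =====
-- import sys, math
--
-- def addr_cost(addr: int) -> int:
--     return math.isqrt(addr - 1) + 1
--
-- def compute_analytical_cost(Ti, Tj, N=16):
--     """Compute analytical cost for the sA_cache=1, tmp=2 layout."""
--     nbi = N // Ti
--     nbj = N // Tj
--     nbk = N
--
--     sA_cache = 1
--     tmp_addr = 2
--     sB_base = 3
--     sC_base = 3 + Tj
--     scratch_end = sC_base + Ti * Tj
--
--     A_base = scratch_end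
--     B_base = A_base + N * N
--     C_base = B_base + N * N
--
--     # Scratch costs
--     sA_cost = Ti * nbk * Tj * nbi * nbj * addr_cost(sA_cache)
--     tmp_cost = Ti * (nbk - 1) * Tj * nbi * nbj * addr_cost(tmp_addr)
--     sB_cost = sum(Ti * nbk * nbi * nbj * addr_cost(sB_base + jj) for jj in range(Tj))
--     sC_cost = sum((nbk - 1) * nbi * nbj * addr_cost(sC_base + ii * Tj + jj)
--                   for ii in range(Ti) for jj in range(Tj))
--     sC_copy_cost = sum(nbi * nbj * addr_cost(sC_base + ii * Tj + jj)
--                        for ii in range(Ti) for jj in range(Tj))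
--
--     # Bulk costs (CORRECTED)
--     bulk_A_cost = sum(nbj * addr_cost(A_base + i) for i in range(N * N))  # read nbj times (not nbi*nbj)
--     bulk_B_cost = sum(nbi * addr_cost(B_base + i) for i in range(N * N))  # read nbi times
--     bulk_C_cost = sum(1 * addr_cost(C_base + i) for i in range(N * N))
--
--     total = sA_cost + tmp_cost + sB_cost + sC_cost + sC_copy_cost + bulk_A_cost + bulk_B_cost + bulk_C_cost
--     return total, {
--         'sA': sA_cost,
--         'tmp': tmp_cost,
--         'sB': sB_cost,
--         'sC_compute': sC_cost,
--         'sC_copy': sC_copy_cost,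
--         'bulk_A': bulk_A_cost,
--         'bulk_B': bulk_B_cost,
--         'bulk_C': bulk_C_cost,
--     }
-- ===== SOURCE B (Python) =====
-- import math
--
-- def compute_analytical_cost(Ti, Tj, N=16):
--     """Compute analytical cost for the sA_cache=1, tmp=2 layout.
--
--     Every per-address sum in the original runs over a contiguous block of
--     addresses, and addr_cost(a) = isqrt(a-1) + 1, so each sum is evaluated in
--     O(1) with a closed form for  sum(isqrt(x) for x in range(n)).
--     """
--     def sqsum(n):
--         # sum of math.isqrt(x) for x in range(n), closed form
--         t = math.isqrt(n)
--         return t * (t - 1) * (4 * t + 1) // 6 + t * (n - t * t)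
--
--     def rc(lo, cnt):
--         # sum of addr_cost(a) over cnt consecutive addresses starting at lo
--         if cnt <= 0:
--             return 0
--         return cnt + sqsum(lo + cnt - 1) - sqsum(lo - 1)
--
--     nbi = N // Ti
--     nbj = N // Tj
--     nbk = N
--     sC_base = 3 + Tj
--     A_base = sC_base + Ti * Tj
--     B_base = A_base + N * N
--     C_base = B_base + N * N
--     sc_cnt = max(Ti, 0) * max(Tj, 0)   # number of (ii, jj) scratch-C cells
--
--     sA_cost = Ti * nbk * Tj * nbi * nbj * rc(1, 1)
--     tmp_cost = Ti * (nbk - 1) * Tj * nbi * nbj * rc(2, 1)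
--     sB_cost = Ti * nbk * nbi * nbj * rc(3, max(Tj, 0))
--     sC_cost = (nbk - 1) * nbi * nbj * rc(sC_base, sc_cnt)
--     sC_copy_cost = nbi * nbj * rc(sC_base, sc_cnt)
--     bulk_A_cost = nbj * rc(A_base, N * N)
--     bulk_B_cost = nbi * rc(B_base, N * N)
--     bulk_C_cost = rc(C_base, N * N)
--
--     total = (sA_cost + tmp_cost + sB_cost + sC_cost + sC_copy_cost
--              + bulk_A_cost + bulk_B_cost + bulk_C_cost)
--     return total, {
--         'sA': sA_cost,
--         'tmp': tmp_cost,
--         'sB': sB_cost,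
--         'sC_compute': sC_cost,
--         'sC_copy': sC_copy_cost,
--         'bulk_A': bulk_A_cost,
--         'bulk_B': bulk_B_cost,
--         'bulk_C': bulk_C_cost,
--     }
-- ===== Notes on version B (the rewrite author's own statement) =====
-- stated objective: faster
-- what changed: Every per-address sum in A runs over a contiguous block of addresses, so B replaces all the Python-level loops by a closed-form formula for sum(isqrt(x) for x in range(n)) (isqrt grouping), evaluating each cost in O(1).
import Mathlib
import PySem

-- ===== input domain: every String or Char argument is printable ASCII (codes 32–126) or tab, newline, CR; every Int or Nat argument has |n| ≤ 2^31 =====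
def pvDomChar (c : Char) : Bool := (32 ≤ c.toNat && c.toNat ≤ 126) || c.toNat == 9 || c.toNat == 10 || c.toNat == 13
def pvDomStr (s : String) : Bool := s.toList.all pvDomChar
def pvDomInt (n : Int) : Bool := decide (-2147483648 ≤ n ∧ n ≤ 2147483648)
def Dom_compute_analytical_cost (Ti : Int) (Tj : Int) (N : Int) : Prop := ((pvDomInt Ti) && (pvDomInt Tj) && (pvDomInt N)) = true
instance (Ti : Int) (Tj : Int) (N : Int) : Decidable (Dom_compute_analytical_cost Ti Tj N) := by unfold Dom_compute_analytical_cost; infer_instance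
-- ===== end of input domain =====

-- B replaces A's per-address Python loops by a closed-form formula for sums of
-- isqrt over contiguous address ranges; equivalence is proved on Pre_ (exactly
-- the inputs where A returns without raising).

-- ===== PORT A =====
-- math.isqrt(addr - 1) + 1; math.isqrt is exact here for addr ≥ 1 (isqrt of a
-- negative raises ValueError in Python — such calls are excluded by Pre_).
def addr_cost (addr : Int) : Int := (Nat.sqrt (addr - 1).toNat : Int) + 1

def compute_analytical_cost (Ti : Int) (Tj : Int) (N : Int) : Int × (List (String × Int)) :=
  let nbi := PySem.Int.floordiv N Ti
  let nbj := PySem.Int.floordiv N Tj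
  let nbk := N
  let sA_cache : Int := 1
  let tmp_addr : Int := 2
  let sB_base : Int := 3
  let sC_base : Int := 3 + Tj
  let scratch_end := sC_base + Ti * Tj
  let A_base := scratch_end
  let B_base := A_base + N * N
  let C_base := B_base + N * N
  let sA_cost := Ti * nbk * Tj * nbi * nbj * addr_cost sA_cache
  let tmp_cost := Ti * (nbk - 1) * Tj * nbi * nbj * addr_cost tmp_addr
  let sB_cost := ((PySem.List.pyRange 0 Tj).map (fun jj => Ti * nbk * nbi * nbj * addr_cost (sB_base + jj))).sum
  let sC_cost := ((PySem.List.pyRange 0 Ti).flatMap (fun ii => (PySem.List.pyRange 0 Tj).map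
      (fun jj => (nbk - 1) * nbi * nbj * addr_cost (sC_base + ii * Tj + jj)))).sum
  let sC_copy_cost := ((PySem.List.pyRange 0 Ti).flatMap (fun ii => (PySem.List.pyRange 0 Tj).map
      (fun jj => nbi * nbj * addr_cost (sC_base + ii * Tj + jj)))).sum
  let bulk_A_cost := ((PySem.List.pyRange 0 (N * N)).map (fun i => nbj * addr_cost (A_base + i))).sum
  let bulk_B_cost := ((PySem.List.pyRange 0 (N * N)).map (fun i => nbi * addr_cost (B_base + i))).sum
  let bulk_C_cost := ((PySem.List.pyRange 0 (N * N)).map (fun i => 1 * addr_cost (C_base + i))).sum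
  let total := sA_cost + tmp_cost + sB_cost + sC_cost + sC_copy_cost + bulk_A_cost + bulk_B_cost + bulk_C_cost
  (total, [("sA", sA_cost), ("tmp", tmp_cost), ("sB", sB_cost), ("sC_compute", sC_cost),
           ("sC_copy", sC_copy_cost), ("bulk_A", bulk_A_cost), ("bulk_B", bulk_B_cost), ("bulk_C", bulk_C_cost)])

-- ===== PORT B =====
-- sum of math.isqrt(x) for x in range(n), closed form (math.isqrt(n) is exact
-- for n ≥ 0; B only calls it on nonnegative arguments).
def pv_sqsum (n : Int) : Int :=
  let t : Int := (Nat.sqrt n.toNat : Int)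
  PySem.Int.floordiv (t * (t - 1) * (4 * t + 1)) 6 + t * (n - t * t)

-- sum of addr_cost(a) over cnt consecutive addresses starting at lo
def pv_rc (lo cnt : Int) : Int :=
  if cnt ≤ 0 then 0 else cnt + pv_sqsum (lo + cnt - 1) - pv_sqsum (lo - 1)

def compute_analytical_cost_alt (Ti : Int) (Tj : Int) (N : Int) : Int × (List (String × Int)) :=
  let nbi := PySem.Int.floordiv N Ti
  let nbj := PySem.Int.floordiv N Tj
  let nbk := N
  let sC_base := 3 + Tj
  let A_base := sC_base + Ti * Tj
  let B_base := A_base + N * N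
  let C_base := B_base + N * N
  let sc_cnt := max Ti 0 * max Tj 0
  let sA_cost := Ti * nbk * Tj * nbi * nbj * pv_rc 1 1
  let tmp_cost := Ti * (nbk - 1) * Tj * nbi * nbj * pv_rc 2 1
  let sB_cost := Ti * nbk * nbi * nbj * pv_rc 3 (max Tj 0)
  let sC_cost := (nbk - 1) * nbi * nbj * pv_rc sC_base sc_cnt
  let sC_copy_cost := nbi * nbj * pv_rc sC_base sc_cnt
  let bulk_A_cost := nbj * pv_rc A_base (N * N)
  let bulk_B_cost := nbi * pv_rc B_base (N * N)
  let bulk_C_cost := pv_rc C_base (N * N)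
  let total := sA_cost + tmp_cost + sB_cost + sC_cost + sC_copy_cost + bulk_A_cost + bulk_B_cost + bulk_C_cost
  (total, [("sA", sA_cost), ("tmp", tmp_cost), ("sB", sB_cost), ("sC_compute", sC_cost),
           ("sC_copy", sC_copy_cost), ("bulk_A", bulk_A_cost), ("bulk_B", bulk_B_cost), ("bulk_C", bulk_C_cost)])

-- ===== PRECONDITION & SPEC =====
-- Pre_ is exactly where the Python A returns: Ti = 0 or Tj = 0 raise
-- ZeroDivisionError in N // Ti / N // Tj, and if N ≠ 0 and the first bulk
-- address A_base = 3 + Tj + Ti*Tj is ≤ 0 then math.isqrt raises ValueError.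
def Pre_compute_analytical_cost (Ti : Int) (Tj : Int) (N : Int) : Prop :=
  Ti ≠ 0 ∧ Tj ≠ 0 ∧ (N = 0 ∨ 1 ≤ 3 + Tj + Ti * Tj)
instance (Ti : Int) (Tj : Int) (N : Int) : Decidable (Pre_compute_analytical_cost Ti Tj N) := by
  unfold Pre_compute_analytical_cost; infer_instance

def pvWitness_compute_analytical_cost : Int × Int × Int := (2, 2, 4)

def Spec_compute_analytical_cost (Ti : Int) (Tj : Int) (N : Int) (out : Int × (List (String × Int))) : Prop := out = compute_analytical_cost_alt Ti Tj N
instance (Ti : Int) (Tj : Int) (N : Int) (out : Int × (List (String × Int))) : Decidable (Spec_compute_analytical_cost Ti Tj N out) := by unfold Spec_compute_analytical_cost; infer_instance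

-- ===== CLAIM (what is proved, stated in full; the proofs are below) =====
def Claim_equal_compute_analytical_cost : Prop := ∀ (Ti : Int) (Tj : Int) (N : Int), Dom_compute_analytical_cost Ti Tj N → Pre_compute_analytical_cost Ti Tj N → Spec_compute_analytical_cost Ti Tj N (compute_analytical_cost Ti Tj N)

-- ===== LEMMAS AND PROOFS =====

def sqsumN (m : Nat) : Nat := ((List.range m).map Nat.sqrt).sum

theorem sqsumN_succ (m : Nat) : sqsumN (m + 1) = sqsumN m + Nat.sqrt m := by
  simp [sqsumN, List.range_succ]

theorem sqrt_succ_cases (m : Nat) :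
    Nat.sqrt (m + 1) = Nat.sqrt m ∨
      (Nat.sqrt (m + 1) = Nat.sqrt m + 1 ∧ m + 1 = (Nat.sqrt m + 1) * (Nat.sqrt m + 1)) := by
  have h1 : m < (Nat.sqrt m + 1) * (Nat.sqrt m + 1) := Nat.lt_succ_sqrt m
  have h2 : Nat.sqrt m ≤ Nat.sqrt (m + 1) := Nat.sqrt_le_sqrt (by omega)
  have h3 : Nat.sqrt (m + 1) ≤ Nat.sqrt m + 1 := by
    have h0 : m + 1 ≤ (Nat.sqrt m + 1) * (Nat.sqrt m + 1) := h1
    have := Nat.sqrt_le_sqrt h0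
    simpa [Nat.sqrt_eq] using this
  rcases Nat.eq_or_lt_of_le h2 with h | h
  · exact Or.inl h.symm
  · right
    have ht : Nat.sqrt (m + 1) = Nat.sqrt m + 1 := by omega
    have h4 : Nat.sqrt (m+1) * Nat.sqrt (m+1) ≤ m + 1 := Nat.sqrt_le (m+1)
    refine ⟨ht, ?_⟩
    rw [ht] at h4
    omega

theorem six_sqsumN (m : Nat) :
    (6 : Int) * sqsumN m =
      (Nat.sqrt m : Int) * ((Nat.sqrt m : Int) - 1) * (4 * (Nat.sqrt m : Int) + 1)
        + 6 * (Nat.sqrt m : Int) * ((m : Int) - (Nat.sqrt m : Int) * (Nat.sqrt m : Int)) := by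
  induction m with
  | zero => simp [sqsumN]
  | succ m ih =>
    rw [sqsumN_succ]
    rcases sqrt_succ_cases m with h | ⟨h, hm⟩
    · rw [h]
      push_cast
      push_cast at ih
      linear_combination ih
    · rw [h]
      have hm' : (m : Int) = ((Nat.sqrt m : Int) + 1) * ((Nat.sqrt m : Int) + 1) - 1 := by
        have : (m : Int) + 1 = ((Nat.sqrt m : Int) + 1) * ((Nat.sqrt m : Int) + 1) := by
          exact_mod_cast congrArg (Nat.cast : Nat → Int) hm
        linarith
      push_cast
      push_cast at ih
      rw [hm'] at ih ⊢
      linear_combination ih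

theorem pv_sqsum_eq (n : Int) (hn : 0 ≤ n) : pv_sqsum n = (sqsumN n.toNat : Int) := by
  have h6 := six_sqsumN n.toNat
  have hc : ((n.toNat : Nat) : Int) = n := by omega
  rw [hc] at h6
  simp only [pv_sqsum]
  set t : Int := (Nat.sqrt n.toNat : Int) with ht
  have key : t * (t - 1) * (4 * t + 1) = 6 * ((sqsumN n.toNat : Int) - t * (n - t * t)) := by
    linear_combination -h6
  rw [key, PySem.Int.floordiv_eq_ediv_of_pos (by norm_num : (0:Int) < 6),
      Int.mul_ediv_cancel_left _ (by norm_num : (6:Int) ≠ 0)]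
  ring

theorem pyRange_zero_eq (K : Int) :
    PySem.List.pyRange 0 K = List.map (fun k : Nat => (k : Int)) (List.range K.toNat) := by
  rw [PySem.List.pyRange_of_pos 0 K (by norm_num : (0:Int) < 1)]
  have hcount : (if (0:Int) < K then ((K - 0 + 1 - 1) / 1).toNat else 0) = K.toNat := by
    split_ifs <;> omega
  rw [hcount]
  exact List.map_congr_left fun k _ => by ring

theorem sum_addr_aux (lo : Int) (hlo : 1 ≤ lo) (n : Nat) :
    (List.map (fun i => addr_cost (lo + i)) (List.map (fun k : Nat => (k : Int)) (List.range n))).sum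
      = (sqsumN ((lo - 1).toNat + n) : Int) - (sqsumN (lo - 1).toNat : Int) + n := by
  induction n with
  | zero => simp
  | succ n ih =>
    have h1 : (lo - 1).toNat + (n + 1) = ((lo - 1).toNat + n) + 1 := by omega
    rw [List.range_succ, List.map_append, List.map_append, List.sum_append, ih, h1, sqsumN_succ]
    simp only [List.map_cons, List.map_nil, List.sum_cons, List.sum_nil, addr_cost]
    have h2 : (lo + (n : Int) - 1).toNat = (lo - 1).toNat + n := by omega
    rw [h2]
    push_cast
    ring

theorem sum_addr (lo K : Int) (hlo : 1 ≤ lo) :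
    ((PySem.List.pyRange 0 K).map (fun i => addr_cost (lo + i))).sum = pv_rc lo K := by
  rw [pyRange_zero_eq, sum_addr_aux lo hlo]
  by_cases hK : K ≤ 0
  · have h0 : K.toNat = 0 := by omega
    simp [pv_rc, hK, h0]
  · have h1 : ¬ (K ≤ 0) := hK
    rw [pv_rc, if_neg h1]
    rw [pv_sqsum_eq (lo + K - 1) (by omega), pv_sqsum_eq (lo - 1) (by omega)]
    have e1 : (lo + K - 1).toNat = (lo - 1).toNat + K.toNat := by omega
    rw [e1]
    omega

theorem rc_add (b m k : Int) (hm : 0 ≤ m) (hk : 0 ≤ k) :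
    pv_rc b m + pv_rc (b + m) k = pv_rc b (m + k) := by
  by_cases hm0 : m ≤ 0
  · have : m = 0 := by omega
    subst this
    simp [pv_rc]
  · by_cases hk0 : k ≤ 0
    · have : k = 0 := by omega
      subst this
      simp [pv_rc]
    · rw [pv_rc, if_neg hm0, pv_rc, if_neg hk0, pv_rc, if_neg (by omega : ¬ (m + k ≤ 0))]
      have e1 : b + m + k - 1 = b + (m + k) - 1 := by ring
      rw [e1]
      ring

theorem rc_rows (b : Int) (a : Nat) (Tj : Int) (hTj : 0 ≤ Tj) :
    ((List.range a).map (fun ii : Nat => pv_rc (b + (ii : Int) * Tj) Tj)).sum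
      = pv_rc b ((a : Int) * Tj) := by
  induction a with
  | zero => simp [pv_rc]
  | succ a ih =>
    rw [List.range_succ, List.map_append, List.sum_append, ih]
    simp only [List.map_cons, List.map_nil, List.sum_cons, List.sum_nil, add_zero]
    have := rc_add b ((a : Int) * Tj) Tj (by positivity) hTj
    rw [this]
    push_cast
    ring_nf

theorem sum_flatMap' (l : List Int) (f : Int → List Int) :
    (l.flatMap f).sum = (l.map fun x => (f x).sum).sum := by
  induction l with
  | nil => simp
  | cons a t ih => simp [List.flatMap_cons, ih]


theorem rc_zero (lo : Int) : pv_rc lo 0 = 0 := by simp [pv_rc]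

theorem rc_max (lo K : Int) : pv_rc lo K = pv_rc lo (max K 0) := by
  by_cases h : K ≤ 0
  · have hm : max K 0 = 0 := by omega
    simp [pv_rc, h]
  · have hm : max K 0 = K := by omega
    rw [hm]

theorem pyRange_zero_nil (K : Int) (h : K ≤ 0) : PySem.List.pyRange 0 K = [] := by
  rw [pyRange_zero_eq]
  have : K.toNat = 0 := by omega
  simp [this]

-- A's single comprehension with a constant coefficient
theorem sum_caddr (c lo K : Int) (h : 1 ≤ lo ∨ K ≤ 0) :
    ((PySem.List.pyRange 0 K).map (fun i => c * addr_cost (lo + i))).sum = c * pv_rc lo K := by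
  by_cases hK : K ≤ 0
  · rw [pyRange_zero_nil K hK]
    simp [pv_rc, hK]
  · have hlo : 1 ≤ lo := h.resolve_right hK
    rw [PySem.List.sum_map_const_mul_int, sum_addr lo K hlo]

-- A's double comprehension (the scratch-C terms)
theorem sum_caddr2 (c b Ti Tj : Int) (hb : 0 < Tj → 1 ≤ b) :
    (((PySem.List.pyRange 0 Ti).flatMap (fun ii => (PySem.List.pyRange 0 Tj).map
        (fun jj => c * addr_cost (b + ii * Tj + jj)))).sum)
      = c * pv_rc b (max Ti 0 * max Tj 0) := by
  by_cases hTj : Tj ≤ 0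
  · have hm : max Tj 0 = 0 := by omega
    rw [hm, mul_zero, rc_zero, mul_zero]
    have : ∀ ii : Int, (PySem.List.pyRange 0 Tj).map
        (fun jj => c * addr_cost (b + ii * Tj + jj)) = [] := by
      intro ii; rw [pyRange_zero_nil Tj hTj]; rfl
    rw [List.flatMap_congr (fun ii _ => this ii)]
    induction (PySem.List.pyRange 0 Ti) with
    | nil => rfl
    | cons a t ih => simpa using ih
  · have hTj' : 0 < Tj := by omega
    rw [sum_flatMap', pyRange_zero_eq Ti, List.map_map]
    have hrow : ∀ ii : Nat, ii ∈ List.range Ti.toNat →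
        (((fun x => ((PySem.List.pyRange 0 Tj).map
            (fun jj => c * addr_cost (b + x * Tj + jj))).sum) ∘ (fun k : Nat => (k : Int))) ii)
          = c * pv_rc (b + (ii : Int) * Tj) Tj := by
      intro ii _
      have hb1 := hb hTj'
      have hge : 0 ≤ (ii : Int) * Tj := by positivity
      have hlo : 1 ≤ b + (ii : Int) * Tj := by omega
      exact sum_caddr c (b + (ii : Int) * Tj) Tj (Or.inl hlo)
    rw [List.map_congr_left hrow, PySem.List.sum_map_const_mul_int, rc_rows b Ti.toNat Tj (by omega)]
    have : ((Ti.toNat : Int)) * Tj = max Ti 0 * max Tj 0 := by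
      have h1 : ((Ti.toNat : Int)) = max Ti 0 := by omega
      have h2 : Tj = max Tj 0 := by omega
      rw [h1, ← h2]
    rw [this]

-- ===== VERDICT (by name: the statement is the Claim_ definition above) =====
theorem compute_analytical_cost_spec : Claim_equal_compute_analytical_cost := by
  intro Ti Tj N hD hP
  obtain ⟨hTi, hTj, hN⟩ := hP
  have eA1 : addr_cost 1 = pv_rc 1 1 := by
    norm_num [addr_cost, pv_rc, pv_sqsum, PySem.Int.floordiv, Nat.sqrt_zero, Nat.sqrt_one,
      (show (2:Int).toNat = 2 by rfl), (show (1:Int).toNat = 1 by rfl), (show (0:Int).toNat = 0 by rfl)]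
  have eA2 : addr_cost 2 = pv_rc 2 1 := by
    norm_num [addr_cost, pv_rc, pv_sqsum, PySem.Int.floordiv, Nat.sqrt_one, Nat.sqrt_two,
      (show (2:Int).toNat = 2 by rfl), (show (1:Int).toNat = 1 by rfl), (show (0:Int).toNat = 0 by rfl)]
  have hA1 : (1:Int) ≤ 3 + Tj + Ti * Tj ∨ N * N ≤ 0 := by
    rcases hN with h | h
    · right; simp [h]
    · left; exact h
  have hB1 : (1:Int) ≤ 3 + Tj + Ti * Tj + N * N ∨ N * N ≤ 0 := by
    rcases hA1 with h | h
    · left; nlinarith [sq_nonneg N]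
    · right; exact h
  have hC1 : (1:Int) ≤ 3 + Tj + Ti * Tj + N * N + N * N ∨ N * N ≤ 0 := by
    rcases hA1 with h | h
    · left; nlinarith [sq_nonneg N]
    · right; exact h
  simp only [Spec_compute_analytical_cost, compute_analytical_cost, compute_analytical_cost_alt]
  rw [eA1, eA2,
      sum_caddr (Ti * N * (PySem.Int.floordiv N Ti) * (PySem.Int.floordiv N Tj)) 3 Tj (Or.inl (by norm_num)),
      sum_caddr2 ((N - 1) * (PySem.Int.floordiv N Ti) * (PySem.Int.floordiv N Tj)) (3 + Tj) Ti Tj (fun h => by omega),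
      sum_caddr2 ((PySem.Int.floordiv N Ti) * (PySem.Int.floordiv N Tj)) (3 + Tj) Ti Tj (fun h => by omega),
      sum_caddr (PySem.Int.floordiv N Tj) (3 + Tj + Ti * Tj) (N * N) hA1,
      sum_caddr (PySem.Int.floordiv N Ti) (3 + Tj + Ti * Tj + N * N) (N * N) hB1,
      sum_caddr 1 (3 + Tj + Ti * Tj + N * N + N * N) (N * N) hC1,
      rc_max 3 Tj]
  rw [one_mul]
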